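-- pv_equiv track=rewrite | github.com/mongoose1616/WatchTowerPlan | core/python/src/watchtower_core/repo_ops/task_lifecycle_support.py | ordered_sections
-- ===== SOURCE A (Python) =====
-- _TASK_SECTION_ORDER = ("Summary", "Scope", "Done When")
--
-- def ordered_sections(sections: dict[str, str]) -> dict[str, str]:
--     """Order task sections using the stable task-document convention."""
--
--     ordered: dict[str, str] = {}
--     for section_title in _TASK_SECTION_ORDER:
--         body = sections.get(section_title)
--         if body is None:
--             continue
--         ordered[section_title] = body
--     for section_title, body in sections.items():
--         if section_title not in ordered:
--             ordered[section_title] = body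
--     return ordered
-- ===== SOURCE B (Python) =====
-- _TASK_SECTION_ORDER = ("Summary", "Scope", "Done When")
--
--
-- def ordered_sections(sections: dict[str, str]) -> dict[str, str]:
--     """Order task sections using the stable task-document convention."""
--
--     def priority(item):
--         title = item[0]
--         if title in _TASK_SECTION_ORDER:
--             return _TASK_SECTION_ORDER.index(title)
--         return len(_TASK_SECTION_ORDER)
--
--     return dict(sorted(sections.items(), key=priority))
-- ===== Notes on version B (the rewrite author's own statement) =====
-- stated objective: idiomatic
-- what changed: Replaces A's two explicit placement passes (known titles placed by probing the fixed order tuple, then a membership-filtered second pass for the rest) with a single stable sort of the items under a priority key (position in _TASK_SECTION_ORDER, unknown titles last) wrapped in dict().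
import Mathlib
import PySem

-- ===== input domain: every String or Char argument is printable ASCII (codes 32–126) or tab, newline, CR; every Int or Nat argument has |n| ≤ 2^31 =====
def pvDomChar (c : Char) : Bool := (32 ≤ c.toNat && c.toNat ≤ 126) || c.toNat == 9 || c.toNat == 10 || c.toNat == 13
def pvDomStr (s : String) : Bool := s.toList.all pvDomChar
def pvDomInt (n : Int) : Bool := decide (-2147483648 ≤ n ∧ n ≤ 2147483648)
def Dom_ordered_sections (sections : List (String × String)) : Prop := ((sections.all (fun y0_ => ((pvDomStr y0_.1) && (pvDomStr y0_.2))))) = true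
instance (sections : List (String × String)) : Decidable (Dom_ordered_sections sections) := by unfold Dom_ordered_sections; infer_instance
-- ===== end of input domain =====

-- B replaces A's two explicit placement passes by one stable sort of the items under a
-- priority key (position in _TASK_SECTION_ORDER, unknown titles last); objective: idiomatic.

-- _TASK_SECTION_ORDER = ("Summary", "Scope", "Done When")
def pvOrd : List String := ["Summary", "Scope", "Done When"]

-- ===== PORT A =====
-- body of A's first loop: body = sections.get(t); if body is None: continue; ordered[t] = body
def pvStep1 (s d : PySem.Dict String String) (t : String) : PySem.Dict String String :=
  match s.get? t with
  | none => d
  | some b => d.insert t b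

-- body of A's second loop: if title not in ordered: ordered[title] = body
def pvStep2 (d : PySem.Dict String String) (p : String × String) : PySem.Dict String String :=
  if !d.contains p.1 then d.insert p.1 p.2 else d

def ordered_sections (sections : List (String × String)) : List (String × String) :=
  let s := PySem.Dict.mk sections
  let ordered := pvOrd.foldl (pvStep1 s) PySem.Dict.empty
  (s.items.foldl pvStep2 ordered).items

-- ===== PORT B =====
-- key(item) = _TASK_SECTION_ORDER.index(title) if title in _TASK_SECTION_ORDER else len(_TASK_SECTION_ORDER)
-- (.index is guarded by the membership test, so the .getD default is never used)
def pvPriority (p : String × String) : Int :=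
  if pvOrd.contains p.1 then (((PySem.List.index? pvOrd p.1).getD 0 : Nat) : Int) else 3

def ordered_sections_alt (sections : List (String × String)) : List (String × String) :=
  (PySem.Dict.ofList (PySem.List.sorted sections pvPriority false)).items

-- ===== PRECONDITION & SPEC =====
-- Pre_ excludes association lists with duplicate keys: A's argument is a Python dict, whose
-- keys are always distinct, so no actual Python input is excluded.
def Pre_ordered_sections (sections : List (String × String)) : Prop :=
  (sections.map (fun p => p.1)).Nodup
instance (sections : List (String × String)) : Decidable (Pre_ordered_sections sections) := by
  unfold Pre_ordered_sections; infer_instance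

def pvWitness_ordered_sections : (List (String × String)) :=
  [("Scope", "s"), ("Extra", "e"), ("Summary", "m")]

def Spec_ordered_sections (sections : List (String × String)) (out : List (String × String)) : Prop := out = ordered_sections_alt sections
instance (sections : List (String × String)) (out : List (String × String)) : Decidable (Spec_ordered_sections sections out) := by unfold Spec_ordered_sections; infer_instance

-- ===== CLAIM (what is proved, stated in full; the proofs are below) =====
def Claim_equal_ordered_sections : Prop := ∀ (sections : List (String × String)), Dom_ordered_sections sections → Pre_ordered_sections sections → Spec_ordered_sections sections (ordered_sections sections)

-- ===== LEMMAS AND PROOFS =====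

-- the priority key, case by case
theorem pvPriority_eq (p : String × String) :
    pvPriority p = if p.1 = "Summary" then 0 else if p.1 = "Scope" then 1
      else if p.1 = "Done When" then 2 else 3 := by
  by_cases h1 : p.1 = "Summary"
  · simp [pvPriority, pvOrd, h1]
  · by_cases h2 : p.1 = "Scope"
    · simp [pvPriority, pvOrd, h2]
      rfl
    · by_cases h3 : p.1 = "Done When"
      · simp [pvPriority, pvOrd, h3]
        decide
      · simp [pvPriority, pvOrd, h1, h2, h3]

-- the i-th bucket of the stable sort
def pvBkt (i : Int) (l : List (String × String)) : List (String × String) :=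
  l.filter (fun p => pvPriority p == i)

theorem pvBkt_append (i : Int) (l m : List (String × String)) :
    pvBkt i (l ++ m) = pvBkt i l ++ pvBkt i m := by
  simp [pvBkt, List.filter_append]

theorem insertBy_split (x : String × String) (A B : List (String × String))
    (hA : ∀ a ∈ A, ¬ pvPriority x < pvPriority a)
    (hB : ∀ b ∈ B, pvPriority x < pvPriority b) :
    PySem.List.insertBy (fun a b => decide (pvPriority a < pvPriority b)) x (A ++ B)
      = A ++ x :: B := by
  induction A with
  | nil =>
    cases B with
    | nil => rfl
    | cons b t =>
      simp only [List.nil_append]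
      simp [PySem.List.insertBy, hB b (by simp)]
  | cons a A ih =>
    have ha : ¬ pvPriority x < pvPriority a := hA a (by simp)
    simp only [List.cons_append]
    simp only [PySem.List.insertBy, ha, decide_eq_true_eq]
    rw [ih (fun a h => hA a (by simp [h]))]
    simp

theorem pvPriority_mem_bkt {i : Int} {l : List (String × String)} {a : String × String}
    (h : a ∈ pvBkt i l) : pvPriority a = i := by
  have := (List.mem_filter.mp h).2
  simpa using this

theorem sorted_buckets (xs : List (String × String)) :
    PySem.List.sorted xs pvPriority false
      = pvBkt 0 xs ++ pvBkt 1 xs ++ pvBkt 2 xs ++ pvBkt 3 xs := by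
  induction xs using List.reverseRecOn with
  | nil => rfl
  | append_singleton xs x ih =>
    have hstep : PySem.List.sorted (xs ++ [x]) pvPriority false
        = PySem.List.insertBy (fun a b => decide (pvPriority a < pvPriority b)) x
            (PySem.List.sorted xs pvPriority false) := by
      simp [PySem.List.sorted, List.foldl_append]
    rw [hstep, ih]
    have hx := pvPriority_eq x
    simp only [pvBkt_append]
    by_cases h1 : x.1 = "Summary"
    · have hk : pvPriority x = 0 := by simp [hx, h1]
      have := insertBy_split x (pvBkt 0 xs)
        (pvBkt 1 xs ++ pvBkt 2 xs ++ pvBkt 3 xs)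
        (fun a ha => by have := pvPriority_mem_bkt ha; omega)
        (fun b hb => by
          rcases List.mem_append.mp hb with hb' | hb3
          · rcases List.mem_append.mp hb' with hb1 | hb2
            · have := pvPriority_mem_bkt hb1; omega
            · have := pvPriority_mem_bkt hb2; omega
          · have := pvPriority_mem_bkt hb3; omega)
      simp only [List.append_assoc] at this ⊢
      rw [this]
      have h0 : pvBkt 0 [x] = [x] := by simp [pvBkt, hk]
      have h1' : pvBkt 1 [x] = [] := by simp [pvBkt, hk]
      have h2' : pvBkt 2 [x] = [] := by simp [pvBkt, hk]
      have h3' : pvBkt 3 [x] = [] := by simp [pvBkt, hk]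
      simp [h0, h1', h2', h3']
    · by_cases h2 : x.1 = "Scope"
      · have hk : pvPriority x = 1 := by simp [hx, h2]
        have := insertBy_split x (pvBkt 0 xs ++ pvBkt 1 xs)
          (pvBkt 2 xs ++ pvBkt 3 xs)
          (fun a ha => by
            rcases List.mem_append.mp ha with ha0 | ha1
            · have := pvPriority_mem_bkt ha0; omega
            · have := pvPriority_mem_bkt ha1; omega)
          (fun b hb => by
            rcases List.mem_append.mp hb with hb2 | hb3
            · have := pvPriority_mem_bkt hb2; omega
            · have := pvPriority_mem_bkt hb3; omega)
        simp only [List.append_assoc] at this ⊢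
        rw [this]
        have h0 : pvBkt 0 [x] = [] := by simp [pvBkt, hk]
        have h1' : pvBkt 1 [x] = [x] := by simp [pvBkt, hk]
        have h2' : pvBkt 2 [x] = [] := by simp [pvBkt, hk]
        have h3' : pvBkt 3 [x] = [] := by simp [pvBkt, hk]
        simp [h0, h1', h2', h3']
      · by_cases h3 : x.1 = "Done When"
        · have hk : pvPriority x = 2 := by simp [hx, h3]
          have := insertBy_split x (pvBkt 0 xs ++ pvBkt 1 xs ++ pvBkt 2 xs)
            (pvBkt 3 xs)
            (fun a ha => by
              rcases List.mem_append.mp ha with ha' | ha2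
              · rcases List.mem_append.mp ha' with ha0 | ha1
                · have := pvPriority_mem_bkt ha0; omega
                · have := pvPriority_mem_bkt ha1; omega
              · have := pvPriority_mem_bkt ha2; omega)
            (fun b hb => by have := pvPriority_mem_bkt hb; omega)
          simp only [List.append_assoc] at this ⊢
          rw [this]
          have h0 : pvBkt 0 [x] = [] := by simp [pvBkt, hk]
          have h1' : pvBkt 1 [x] = [] := by simp [pvBkt, hk]
          have h2' : pvBkt 2 [x] = [x] := by simp [pvBkt, hk]
          have h3' : pvBkt 3 [x] = [] := by simp [pvBkt, hk]
          simp [h0, h1', h2', h3']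
        · have hk : pvPriority x = 3 := by simp [hx, h1, h2, h3]
          have := insertBy_split x
            (pvBkt 0 xs ++ pvBkt 1 xs ++ pvBkt 2 xs ++ pvBkt 3 xs) []
            (fun a ha => by
              rcases List.mem_append.mp ha with ha' | ha3
              · rcases List.mem_append.mp ha' with ha'' | ha2
                · rcases List.mem_append.mp ha'' with ha0 | ha1
                  · have := pvPriority_mem_bkt ha0; omega
                  · have := pvPriority_mem_bkt ha1; omega
                · have := pvPriority_mem_bkt ha2; omega
              · have := pvPriority_mem_bkt ha3; omega)
            (by simp)
          simp only [List.append_assoc, List.append_nil] at this ⊢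
          rw [this]
          have h0 : pvBkt 0 [x] = [] := by simp [pvBkt, hk]
          have h1' : pvBkt 1 [x] = [] := by simp [pvBkt, hk]
          have h2' : pvBkt 2 [x] = [] := by simp [pvBkt, hk]
          have h3' : pvBkt 3 [x] = [x] := by simp [pvBkt, hk]
          simp [h0, h1', h2', h3']

-- buckets 0..2 are the single known sections, read off from get?
theorem filter_eq_of_get?_some {l : List (String × String)}
    (hnd : (l.map (fun p => p.1)).Nodup) {t : String} {b : String}
    (h : (PySem.Dict.mk l).get? t = some b) :
    l.filter (fun p => p.1 == t) = [(t, b)] := by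
  induction l with
  | nil => simp [PySem.Dict.get?] at h
  | cons p l ih =>
    rw [PySem.Dict.get?_mk_cons] at h
    by_cases hp : p.1 = t
    · have hb : p.2 = b := by simp [hp] at h; exact h
      have : l.filter (fun q => q.1 == t) = [] := by
        apply List.filter_eq_nil_iff.mpr
        intro q hq
        have hne : q.1 ≠ p.1 := by
          intro he
          have hmem : q.1 ∈ l.map (fun p => p.1) := List.mem_map.mpr ⟨q, hq, rfl⟩
          rw [he] at hmem
          exact (List.nodup_cons.mp hnd).1 hmem
        simp only [beq_iff_eq]
        rw [← hp]
        exact hne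
      have hpe : p = (t, b) := by
        obtain ⟨pf, ps⟩ := p
        simp only at hp hb
        rw [hp, hb]
      rw [List.filter_cons_of_pos (by simp [hp]), this, hpe]
    · have hbe : (p.1 == t) = false := by simp [hp]
      simp only [hbe, Bool.false_eq_true, if_false] at h
      rw [List.filter_cons_of_neg (by simp [hbe])]
      exact ih (List.nodup_cons.mp hnd).2 h
  
theorem filter_eq_nil_of_get?_none {l : List (String × String)} {t : String}
    (h : (PySem.Dict.mk l).get? t = none) :
    l.filter (fun p => p.1 == t) = [] := by
  apply List.filter_eq_nil_iff.mpr
  intro q hq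
  simp only [PySem.Dict.get?, Option.map_eq_none_iff, List.find?_eq_none] at h
  simpa using h q hq

-- bucket ↔ literal-key filter
theorem bkt0_eq (l : List (String × String)) :
    pvBkt 0 l = l.filter (fun p => p.1 == "Summary") := by
  apply List.filter_congr
  intro p _
  simp [pvPriority_eq p]
  by_cases h : p.1 = "Summary" <;> simp [h] <;> split_ifs <;> simp_all

theorem bkt1_eq (l : List (String × String)) :
    pvBkt 1 l = l.filter (fun p => p.1 == "Scope") := by
  apply List.filter_congr
  intro p _
  simp [pvPriority_eq p]
  by_cases h : p.1 = "Scope" <;> simp [h] <;> split_ifs <;> simp_all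

theorem bkt2_eq (l : List (String × String)) :
    pvBkt 2 l = l.filter (fun p => p.1 == "Done When") := by
  apply List.filter_congr
  intro p _
  simp [pvPriority_eq p]
  by_cases h : p.1 = "Done When" <;> simp [h] <;> split_ifs <;> simp_all

theorem bkt3_eq (l : List (String × String)) :
    pvBkt 3 l = l.filter (fun p => !decide (p.1 ∈ pvOrd)) := by
  apply List.filter_congr
  intro p _
  simp only [pvPriority_eq p, pvOrd]
  split_ifs <;> simp_all

-- A's first loop builds exactly the three known buckets, in priority order
theorem loop1_items {sections : List (String × String)}
    (hnd : (sections.map (fun p => p.1)).Nodup) :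
    (pvOrd.foldl (pvStep1 (PySem.Dict.mk sections)) PySem.Dict.empty).items
      = pvBkt 0 sections ++ pvBkt 1 sections ++ pvBkt 2 sections := by
  rw [bkt0_eq, bkt1_eq, bkt2_eq]
  simp only [pvOrd, List.foldl, pvStep1]
  rcases h0 : (PySem.Dict.mk sections).get? "Summary" with _ | b0 <;>
    rcases h1 : (PySem.Dict.mk sections).get? "Scope" with _ | b1 <;>
      rcases h2 : (PySem.Dict.mk sections).get? "Done When" with _ | b2 <;>
        simp [filter_eq_of_get?_some hnd, filter_eq_nil_of_get?_none,
          h0, h1, h2, PySem.Dict.items_insert_of_not_contains, PySem.Dict.contains_insert,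
          PySem.Dict.empty]
  
-- A's second loop appends exactly the unknown sections, in input order
theorem loop2_items (l : List (String × String)) (d : PySem.Dict String String)
    (hc : ∀ p ∈ l, d.contains p.1 = decide (p.1 ∈ pvOrd))
    (hnd : (l.map (fun p => p.1)).Nodup) :
    (l.foldl pvStep2 d).items = d.items ++ l.filter (fun p => !decide (p.1 ∈ pvOrd)) := by
  induction l generalizing d with
  | nil => simp
  | cons p l ih =>
    have hp := hc p (by simp)
    have hnd' := (List.nodup_cons.mp hnd).2
    have hpfresh : ∀ q ∈ l, q.1 ≠ p.1 := by
      intro q hq he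
      have hmem : q.1 ∈ l.map (fun r => r.1) := List.mem_map.mpr ⟨q, hq, rfl⟩
      rw [he] at hmem
      exact (List.nodup_cons.mp hnd).1 hmem
    by_cases hm : p.1 ∈ pvOrd
    · have : pvStep2 d p = d := by simp [pvStep2, hp, hm]
      simp only [List.foldl_cons, this]
      rw [ih d (fun q hq => hc q (by simp [hq])) hnd']
      simp [hm]
    · have hstep : pvStep2 d p = d.insert p.1 p.2 := by simp [pvStep2, hp, hm]
      simp only [List.foldl_cons, hstep]
      rw [ih (d.insert p.1 p.2) ?_ hnd']
      · rw [PySem.Dict.items_insert_of_not_contains d p.2 (by simp [hp, hm])]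
        simp [hm]
      · intro q hq
        rw [PySem.Dict.contains_insert]
        have : (q.1 == p.1) = false := by simp [hpfresh q hq]
        simp [this, hc q (by simp [hq])]

-- keys of the first loop's result: only known titles actually present
theorem loop1_contains {sections : List (String × String)}
    (hnd : (sections.map (fun p => p.1)).Nodup)
    (p : String × String) (hp : p ∈ sections) :
    (pvOrd.foldl (pvStep1 (PySem.Dict.mk sections)) PySem.Dict.empty).contains p.1
      = decide (p.1 ∈ pvOrd) := by
  have hitems := loop1_items hnd
  rw [PySem.Dict.contains, hitems, bkt0_eq, bkt1_eq, bkt2_eq]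
  by_cases hm : p.1 ∈ pvOrd
  · have hget : (PySem.Dict.mk sections).get? p.1 = some p.2 := by
      apply (PySem.Dict.get?_eq_some_iff_mem_items _ _ _ ?_).mpr hp
      simpa [PySem.Dict.keys] using hnd
    simp only [pvOrd, List.mem_cons, List.not_mem_nil, or_false] at hm
    rcases hm with hm | hm | hm <;>
      simp [filter_eq_of_get?_some hnd (hm ▸ hget), hm, pvOrd]
  · simp only [List.any_append]
    have : ∀ t, p.1 ≠ t → (sections.filter (fun q => q.1 == t)).any (fun q => q.1 == p.1) = false := by
      intro t ht
      apply List.any_eq_false.mpr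
      intro q hq
      have := (List.mem_filter.mp hq).2
      simp only [beq_iff_eq] at this ⊢
      exact fun he => ht (he ▸ this)
    have hm' : p.1 ≠ "Summary" ∧ p.1 ≠ "Scope" ∧ p.1 ≠ "Done When" := by
      simpa [pvOrd] using hm
    simp [this _ hm'.1, this _ hm'.2.1, this _ hm'.2.2, hm]
    
-- dict() of a duplicate-free item list keeps it unchanged
theorem ofList_items_of_nodup (l : List (String × String))
    (hnd : (l.map (fun p => p.1)).Nodup) :
    (PySem.Dict.ofList l).items = l := by
  have := PySem.Dict.items_foldl_insert_fresh l (fun p => p.1) (fun p => p.2)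
    PySem.Dict.empty (fun a _ => by simp) hnd
  simpa [PySem.Dict.ofList, PySem.Dict.update] using this

-- ===== VERDICT (by name: the statement is the Claim_ definition above) =====
theorem ordered_sections_spec : Claim_equal_ordered_sections := by
  intro sections _ hpre
  have hnd : (sections.map (fun p => p.1)).Nodup := hpre
  show ordered_sections sections = ordered_sections_alt sections
  have hsortnd : ((PySem.List.sorted sections pvPriority false).map (fun p => p.1)).Nodup := by
    have hperm : (PySem.List.sorted sections pvPriority false).Perm sections :=
      PySem.List.sorted_perm sections pvPriority false
    exact ((hperm.map (fun p => p.1)).nodup_iff).mpr hnd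
  have hB : ordered_sections_alt sections
      = pvBkt 0 sections ++ pvBkt 1 sections ++ pvBkt 2 sections ++ pvBkt 3 sections := by
    rw [ordered_sections_alt, ofList_items_of_nodup _ hsortnd, sorted_buckets]
  have hA : ordered_sections sections
      = (pvBkt 0 sections ++ pvBkt 1 sections ++ pvBkt 2 sections)
          ++ sections.filter (fun p => !decide (p.1 ∈ pvOrd)) := by
    show ((PySem.Dict.mk sections).items.foldl pvStep2
        (pvOrd.foldl (pvStep1 (PySem.Dict.mk sections)) PySem.Dict.empty)).items = _
    rw [loop2_items _ _ (fun p hp => loop1_contains hnd p hp) hnd, loop1_items hnd]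
  rw [hA, hB, ← bkt3_eq]
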